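-- pv_equiv track=rewrite | github.com/shivang-jagwan/watch_the_code | backend/solver/pre_solve_locks.py | contiguous_starts
-- ===== SOURCE A (Python) =====
-- from typing import Any, Iterator
--
-- def contiguous_starts(sorted_indices: list[int], block: int) -> Iterator[int]:
--     """Yield start indices from *sorted_indices* where *block* contiguous slots exist."""
--     if block <= 1:
--         yield from sorted_indices
--         return
--     if not sorted_indices:
--         return
--
--     run_start = sorted_indices[0]
--     prev = sorted_indices[0]
--     for idx in sorted_indices[1:]:
--         if idx == prev + 1:
--             prev = idx
--             continue
--
--         run_end = prev
--         if (run_end - run_start + 1) >= block: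
--             for start in range(run_start, run_end - block + 2):
--                 yield start
--
--         run_start = idx
--         prev = idx
--
--     run_end = prev
--     if (run_end - run_start + 1) >= block:
--         for start in range(run_start, run_end - block + 2):
--             yield start
-- ===== SOURCE B (Python) =====
-- def contiguous_starts(sorted_indices, block):
--     """Yield start indices from *sorted_indices* where *block* contiguous slots exist."""
--     if block <= 1:
--         yield from sorted_indices
--         return
--     prev = None
--     streak = 0
--     for x in sorted_indices:
--         streak = streak + 1 if (prev is not None and x == prev + 1) else 1
--         if streak >= block:
--             yield x - block + 1
--         prev = x
-- ===== Notes on version B (the rewrite author's own statement) =====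
-- stated objective: alternative
-- what changed: B replaces A's run segmentation (track run_start/prev, flush range(run_start, run_end-block+2) at each break and at the end) with a streak counter that emits the end-anchored start x-block+1 for every element completing a window of block consecutive values; no run boundaries or range emission.
import Mathlib
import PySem

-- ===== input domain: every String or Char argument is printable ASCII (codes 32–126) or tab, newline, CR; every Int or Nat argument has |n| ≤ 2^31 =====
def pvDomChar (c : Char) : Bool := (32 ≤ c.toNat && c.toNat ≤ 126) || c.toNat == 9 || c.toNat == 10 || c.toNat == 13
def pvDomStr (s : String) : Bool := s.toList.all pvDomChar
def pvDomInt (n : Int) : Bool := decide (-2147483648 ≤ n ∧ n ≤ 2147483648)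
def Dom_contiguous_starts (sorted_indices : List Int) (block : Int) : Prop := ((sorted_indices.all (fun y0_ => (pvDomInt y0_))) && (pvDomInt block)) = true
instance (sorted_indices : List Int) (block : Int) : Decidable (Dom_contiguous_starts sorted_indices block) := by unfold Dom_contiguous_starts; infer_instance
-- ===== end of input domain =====

-- B replaces A's run segmentation + per-run range emission with a streak counter that emits
-- the end-anchored start x-block+1 for every element completing a window of block consecutive
-- values; objective: alternative. Equivalence of the generators' yielded lists.

-- ===== PORT A =====
-- state of A's for-loop: (run_start, prev, yielded-so-far)
def pvStepA (block : Int) (st : Int × Int × List Int) (idx : Int) : Int × Int × List Int :=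
  let (run_start, prev, acc) := st
  if idx = prev + 1 then (run_start, idx, acc)
  else (idx, idx,
    acc ++ (if prev - run_start + 1 ≥ block then PySem.List.pyRange run_start (prev - block + 2) 1 else []))

def contiguous_starts (sorted_indices : List Int) (block : Int) : List Int :=
  if block ≤ 1 then sorted_indices
  else match sorted_indices with
  | [] => []
  | x :: rest =>
    -- run_start = prev = sorted_indices[0]; loop over sorted_indices[1:]
    let st := rest.foldl (pvStepA block) (x, x, [])
    let (run_start, prev, acc) := st
    acc ++ (if prev - run_start + 1 ≥ block then PySem.List.pyRange run_start (prev - block + 2) 1 else [])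

-- ===== PORT B =====
-- state of B's for-loop: (prev : Option Int = None initially, streak, yielded-so-far)
def pvStepB (block : Int) (st : Option Int × Int × List Int) (x : Int) : Option Int × Int × List Int :=
  let (prev, streak, acc) := st
  let streak' := match prev with
    | some p => if x = p + 1 then streak + 1 else 1
    | none => 1
  (some x, streak', if streak' ≥ block then acc ++ [x - block + 1] else acc)

def contiguous_starts_alt (sorted_indices : List Int) (block : Int) : List Int :=
  if block ≤ 1 then sorted_indices
  else (sorted_indices.foldl (pvStepB block) (none, 0, [])).2.2

-- ===== PRECONDITION & SPEC =====
def Spec_contiguous_starts (sorted_indices : List Int) (block : Int) (out : List Int) : Prop := out = contiguous_starts_alt sorted_indices block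
instance (sorted_indices : List Int) (block : Int) (out : List Int) : Decidable (Spec_contiguous_starts sorted_indices block out) := by unfold Spec_contiguous_starts; infer_instance

-- ===== CLAIM =====
def Claim_equal_contiguous_starts : Prop := ∀ (sorted_indices : List Int) (block : Int), Dom_contiguous_starts sorted_indices block → Spec_contiguous_starts sorted_indices block (contiguous_starts sorted_indices block)

-- ===== LEMMAS AND PROOFS =====

-- A's guarded emission equals the unguarded range: empty when the run is shorter than block
theorem pvEmit_eq (block rs pe : Int) :
    (if pe - rs + 1 ≥ block then PySem.List.pyRange rs (pe - block + 2) 1 else [])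
      = PySem.List.pyRange rs (pe - block + 2) 1 := by
  split
  · rfl
  · rw [PySem.List.pyRange_one_eq_nil (by omega)]

-- loop invariant: from A-state (rs, p, accA) and the corresponding B-state
-- (some p, p - rs + 1, accA ++ range(rs, p-block+2)), the final flushed A output equals B's
theorem pvLoop_eq (block : Int) (hb : ¬ block ≤ 1) (l : List Int) : ∀ (rs p : Int) (accA : List Int),
    (l.foldl (pvStepA block) (rs, p, accA)).2.2 ++
      (if (l.foldl (pvStepA block) (rs, p, accA)).2.1 - (l.foldl (pvStepA block) (rs, p, accA)).1 + 1 ≥ block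
       then PySem.List.pyRange (l.foldl (pvStepA block) (rs, p, accA)).1
              ((l.foldl (pvStepA block) (rs, p, accA)).2.1 - block + 2) 1
       else [])
    = (l.foldl (pvStepB block) (some p, p - rs + 1, accA ++ PySem.List.pyRange rs (p - block + 2) 1)).2.2 := by
  induction l with
  | nil => intro rs p accA; simp [pvEmit_eq]
  | cons x xs ih =>
    intro rs p accA
    by_cases hx : x = p + 1
    · -- run continues: streak grows, B may emit x - block + 1
      have hA : pvStepA block (rs, p, accA) x = (rs, p + 1, accA) := by
        simp [pvStepA, hx]
      have hB : pvStepB block (some p, p - rs + 1, accA ++ PySem.List.pyRange rs (p - block + 2) 1) x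
          = (some (p + 1), (p + 1) - rs + 1, accA ++ PySem.List.pyRange rs ((p + 1) - block + 2) 1) := by
        simp only [pvStepB, hx, if_true]
        refine Prod.ext rfl (Prod.ext (by simp; ring) ?_)
        split_ifs with hs
        · have h2 : p - block + 2 = p + 1 - block + 1 := by ring
          rw [show (p + 1) - block + 2 = (p + 1 - block + 1) + 1 by ring,
              PySem.List.pyRange_one_succ_right (by omega), h2, List.append_assoc]
        · rw [PySem.List.pyRange_one_eq_nil (by omega), PySem.List.pyRange_one_eq_nil (by omega)]
      rw [List.foldl_cons, List.foldl_cons, hA, hB, ih rs (p + 1) accA]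
    · -- break: A flushes the run; B resets the streak to 1 and emits nothing (block ≥ 2)
      have hA : pvStepA block (rs, p, accA) x
          = (x, x, accA ++ PySem.List.pyRange rs (p - block + 2) 1) := by
        simp only [pvStepA, if_neg hx, pvEmit_eq]
      have hB : pvStepB block (some p, p - rs + 1, accA ++ PySem.List.pyRange rs (p - block + 2) 1) x
          = (some x, 1, accA ++ PySem.List.pyRange rs (p - block + 2) 1) := by
        simp only [pvStepB, if_neg hx]
        rw [if_neg (show ¬ (1:Int) ≥ block by omega)]
      rw [List.foldl_cons, List.foldl_cons, hA, hB,
          ih x x (accA ++ PySem.List.pyRange rs (p - block + 2) 1)]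
      have h1 : x - x + 1 = (1:Int) := by ring
      rw [h1, PySem.List.pyRange_one_eq_nil (show x - block + 2 ≤ x by omega), List.append_nil]

-- ===== VERDICT =====
theorem contiguous_starts_spec : Claim_equal_contiguous_starts := by
  intro xs block _
  unfold Spec_contiguous_starts contiguous_starts contiguous_starts_alt
  split
  · rfl
  · rename_i hb
    match xs with
    | [] => simp
    | x :: rest =>
      have h0 : pvStepB block (none, 0, []) x = (some x, 1, []) := by
        simp only [pvStepB]
        rw [if_neg (show ¬ (1:Int) ≥ block by omega)]
      simp only [List.foldl_cons, h0]
      have := pvLoop_eq block hb rest x x []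
      rw [PySem.List.pyRange_one_eq_nil (show x - block + 2 ≤ x by omega)] at this
      have h1 : x - x + 1 = (1:Int) := by ring
      rw [h1] at this
      simpa using this
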